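-- pv_equiv track=rewrite | github.com/Aculeasis/mdmt2-web-config | wiki_parser.py | _settings_option_parse_suppressing_1
-- ===== SOURCE A (Python) =====
-- def _settings_option_parse_suppressing_1(result: dict) -> dict:
--     test = None
--     test_count = 0
--     count = 0
--     for val in result.values():
--         count += 1
--         if test is None:
--             test = val
--             test_count += 1
--         elif test == val:
--             test_count += 1
--         else:
--             test = val
--     if test_count > 1 and test_count == count and test:
--         result = {None: test}
--     return result
-- ===== SOURCE B (Python) =====
-- def _settings_option_parse_suppressing_1(result: dict) -> dict:
--     distinct = set(result.values())
--     if len(result) > 1 and len(distinct) == 1: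
--         value = distinct.pop()
--         if value:
--             return {None: value}
--     return result
-- ===== Notes on version B (the rewrite author's own statement) =====
-- stated objective: simpler
-- what changed: Replaces A's stateful sequential pass (test/test_count/count with a three-way branch) by building the set of distinct values once and collapsing iff that set has cardinality 1, the dict has more than one entry and the single value is truthy.
import Mathlib
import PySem

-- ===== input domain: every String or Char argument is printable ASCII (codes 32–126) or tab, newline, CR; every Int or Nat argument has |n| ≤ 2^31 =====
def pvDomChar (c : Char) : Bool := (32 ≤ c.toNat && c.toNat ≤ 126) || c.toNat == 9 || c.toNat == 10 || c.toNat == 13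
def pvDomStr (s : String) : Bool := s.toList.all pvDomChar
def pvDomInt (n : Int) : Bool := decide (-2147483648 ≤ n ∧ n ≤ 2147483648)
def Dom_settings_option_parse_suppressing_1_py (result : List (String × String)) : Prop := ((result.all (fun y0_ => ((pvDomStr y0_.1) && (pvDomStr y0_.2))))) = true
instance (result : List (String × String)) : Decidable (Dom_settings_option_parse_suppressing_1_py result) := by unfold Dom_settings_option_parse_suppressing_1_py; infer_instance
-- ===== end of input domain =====

-- B replaces A's stateful counting pass with a one-shot set of distinct values and a
-- cardinality-1 test (simpler decomposition, same O(n) cost).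
-- ===== PORT A =====
-- the loop body of A (the three-way branch on test), named so the proofs can refer to it
def pvStepA (s : Option String × Int × Int) (val : String) : Option String × Int × Int :=
  let count := s.2.2 + 1
  match s.1 with
  | none => (some val, s.2.1 + 1, count)
  | some t => if t == val then (some t, s.2.1 + 1, count) else (some val, s.2.1, count)

-- A's body after building the dict (helper so the proof can reason per-dict)
def pvBodyA (d : PySem.Dict String String) : List (Option String × String) :=
  let st := d.values.foldl pvStepA (none, 0, 0)
  if st.2.1 > 1 ∧ st.2.1 = st.2.2 ∧ st.1.getD "" ≠ ""  -- 'and test': truthy ⇔ not None and not ""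
  then [(none, st.1.getD "")]
  else d.items.map (fun kv => (some kv.1, kv.2))

def settings_option_parse_suppressing_1_py (result : List (String × String)) : List (Option String × String) :=
  let d := result.foldl (fun d kv => d.insert kv.1 kv.2) (PySem.Dict.empty : PySem.Dict String String)
  pvBodyA d

-- ===== PORT B =====
-- B's body after building the dict; set(result.values()) → PySem.Set.ofList,
-- distinct.pop() on the singleton set → its unique element (headD)
def pvBodyB (d : PySem.Dict String String) : List (Option String × String) :=
  let distinct := PySem.Set.ofList d.values
  if 1 < d.items.length ∧ distinct.length = 1 then
    let value := distinct.headD ""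
    if value ≠ "" then [(none, value)]
    else d.items.map (fun kv => (some kv.1, kv.2))
  else d.items.map (fun kv => (some kv.1, kv.2))

def settings_option_parse_suppressing_1_py_alt (result : List (String × String)) : List (Option String × String) :=
  let d := result.foldl (fun d kv => d.insert kv.1 kv.2) (PySem.Dict.empty : PySem.Dict String String)
  pvBodyB d

-- ===== PRECONDITION & SPEC =====
def Spec_settings_option_parse_suppressing_1_py (result : List (String × String)) (out : List (Option String × String)) : Prop := out = settings_option_parse_suppressing_1_py_alt result
instance (result : List (String × String)) (out : List (Option String × String)) : Decidable (Spec_settings_option_parse_suppressing_1_py result out) := by unfold Spec_settings_option_parse_suppressing_1_py; infer_instance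

-- ===== CLAIM =====
def Claim_equal_settings_option_parse_suppressing_1_py : Prop := ∀ (result : List (String × String)), Dom_settings_option_parse_suppressing_1_py result → Spec_settings_option_parse_suppressing_1_py result (settings_option_parse_suppressing_1_py result)

-- ===== LEMMAS AND PROOFS =====

-- Characterisation of A's loop once test is set: the count, the bound on test_count,
-- full credit iff every later value equals t0, and then test stays t0.
lemma pvLoopA_char (vs : List String) : ∀ (t0 : String) (tc0 c0 : Int),
    (vs.foldl pvStepA (some t0, tc0, c0)).2.2 = c0 + vs.length ∧
    (vs.foldl pvStepA (some t0, tc0, c0)).2.1 ≤ tc0 + vs.length ∧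
    ((vs.foldl pvStepA (some t0, tc0, c0)).2.1 = tc0 + vs.length ↔ vs.all (· == t0) = true) ∧
    (vs.all (· == t0) = true → (vs.foldl pvStepA (some t0, tc0, c0)).1 = some t0) := by
  induction vs with
  | nil => intro t0 tc0 c0; simp [List.foldl]
  | cons v vs ih =>
    intro t0 tc0 c0
    by_cases h : t0 = v
    · subst h
      have hstep : pvStepA (some t0, tc0, c0) t0 = (some t0, tc0 + 1, c0 + 1) := by
        simp [pvStepA]
      obtain ⟨h1, h2, h3, h4⟩ := ih t0 (tc0 + 1) (c0 + 1)
      refine ⟨?_, ?_, ?_, ?_⟩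
      · simp only [List.foldl, hstep, List.length_cons]
        push_cast at h1 ⊢; omega
      · simp only [List.foldl, hstep, List.length_cons]
        push_cast at h2 ⊢; omega
      · simp only [List.foldl, hstep, List.length_cons, List.all_cons, BEq.rfl, Bool.true_and]
        rw [show (tc0 + ((vs.length + 1 : Nat) : Int) : Int) = tc0 + 1 + (vs.length : Int) by
          push_cast; ring]
        exact h3
      · intro hall
        simp only [List.all_cons, BEq.rfl, Bool.true_and] at hall
        simpa [List.foldl, hstep] using h4 hall
    · have hstep : pvStepA (some t0, tc0, c0) v = (some v, tc0, c0 + 1) := by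
        simp [pvStepA, h]
      obtain ⟨h1, h2, h3, h4⟩ := ih v tc0 (c0 + 1)
      refine ⟨?_, ?_, ?_, ?_⟩
      · simp only [List.foldl, hstep, List.length_cons]
        push_cast at h1 ⊢; omega
      · simp only [List.foldl, hstep, List.length_cons]
        push_cast at h2 ⊢; omega
      · constructor
        · intro he
          exfalso
          simp only [List.foldl, hstep, List.length_cons] at he
          push_cast at he h2; omega
        · intro hall
          simp only [List.all_cons, Bool.and_eq_true, beq_iff_eq] at hall
          exact absurd hall.1.symm h
      · intro hall
        simp only [List.all_cons, Bool.and_eq_true, beq_iff_eq] at hall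
        exact absurd hall.1.symm h

-- Set.add only appends: a fold of add over any start is the start plus a suffix.
lemma pvSet_prefix (vs : List String) : ∀ (s : List String),
    ∃ r, vs.foldl PySem.Set.add s = s ++ r := by
  induction vs with
  | nil => intro s; exact ⟨[], by simp⟩
  | cons v vs ih =>
    intro s
    by_cases h : v ∈ s
    · obtain ⟨r, hr⟩ := ih s
      refine ⟨r, ?_⟩
      rw [List.foldl, show PySem.Set.add s v = s from by simp [PySem.Set.add, h]]
      exact hr
    · obtain ⟨r, hr⟩ := ih (s ++ [v])
      refine ⟨[v] ++ r, ?_⟩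
      rw [List.foldl, show PySem.Set.add s v = s ++ [v] from by simp [PySem.Set.add, h]]
      rw [hr, List.append_assoc]

-- The set built from [v] stays [v] exactly when every element equals v.
lemma pvSet_iff (vs : List String) (v : String) :
    (vs.foldl PySem.Set.add [v] = [v]) ↔ vs.all (· == v) = true := by
  induction vs with
  | nil => simp
  | cons x vs ih =>
    by_cases h : x = v
    · subst h
      have hadd : PySem.Set.add [x] x = [x] := by
        simp [PySem.Set.add]
      rw [List.foldl, hadd, List.all_cons, BEq.rfl, Bool.true_and]
      exact ih
    · have hadd : PySem.Set.add [v] x = [v] ++ [x] := by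
        simp [PySem.Set.add, h]
      constructor
      · intro he
        exfalso
        obtain ⟨r, hr⟩ := pvSet_prefix vs ([v] ++ [x])
        rw [List.foldl, hadd, hr] at he
        have := congrArg List.length he
        simp at this
      · intro hall
        simp only [List.all_cons, Bool.and_eq_true, beq_iff_eq] at hall
        exact absurd hall.1 h

-- A's collapse condition coincides with B's set-cardinality condition, and the
-- collapsed values agree.
lemma pvMain (d : PySem.Dict String String) : pvBodyA d = pvBodyB d := by
  unfold pvBodyA pvBodyB
  have hlen : d.items.length = d.values.length := by
    simp [PySem.Dict.values]
  cases hv : d.values with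
  | nil =>
    rw [hv] at hlen
    simp [List.foldl, PySem.Set.ofList, hlen]
  | cons v vs =>
    rw [hv] at hlen
    simp only []
    have hstep : pvStepA (none, 0, 0) v = (some v, 1, 1) := by simp [pvStepA]
    have hof : PySem.Set.ofList (v :: vs) = vs.foldl PySem.Set.add [v] := by
      simp [PySem.Set.ofList_eq_foldl, List.foldl, PySem.Set.add]
    obtain ⟨h1, h2, h3, h4⟩ := pvLoopA_char vs v 1 1
    obtain ⟨r, hr⟩ := pvSet_prefix vs [v]
    rw [List.foldl, hstep, hlen, hof, hr]
    by_cases hall : vs.all (· == v) = true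
    · have ht : (vs.foldl pvStepA (some v, 1, 1)).1 = some v := h4 hall
      have htc : (vs.foldl pvStepA (some v, 1, 1)).2.1 = 1 + vs.length := h3.mpr hall
      have hr0 : r = [] := by
        have := (pvSet_iff vs v).mpr hall
        rw [hr] at this
        simpa using this
      subst hr0
      rw [htc, h1, ht]
      simp only [Option.getD_some, List.append_nil, List.headD_cons, List.length_cons]
      by_cases hvs : vs = []
      · subst hvs
        rw [if_neg (by simp), if_neg (by simp)]
      · have hpos : 0 < vs.length := List.length_pos_iff.mpr hvs
        by_cases hvne : v = ""
        · subst hvne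
          rw [if_neg (by rintro ⟨-, -, hc⟩; exact hc rfl)]
          split_ifs with hb hbv
          · exact absurd rfl hbv
          · rfl
          · rfl
        · rw [if_pos ⟨by omega, by trivial, hvne⟩,
              if_pos ⟨by omega, by trivial⟩, if_pos hvne]
    · have htc : (vs.foldl pvStepA (some v, 1, 1)).2.1 ≠ 1 + vs.length := fun he => hall (h3.mp he)
      have hrr : r ≠ [] := by
        intro he
        apply hall
        apply (pvSet_iff vs v).mp
        rw [hr, he, List.append_nil]
      rw [if_neg (by
            rintro ⟨-, hb, -⟩
            exact htc (by rw [hb, h1])),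
          if_neg (by
            rintro ⟨-, hb⟩
            rw [List.length_append] at hb
            simp at hb
            exact hrr hb)]

-- ===== VERDICT =====
theorem settings_option_parse_suppressing_1_py_spec : Claim_equal_settings_option_parse_suppressing_1_py := by
  intro result _
  unfold Spec_settings_option_parse_suppressing_1_py
  unfold settings_option_parse_suppressing_1_py settings_option_parse_suppressing_1_py_alt
  exact pvMain _
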